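-- pv_equiv track=rewrite | github.com/thiendao2308/api_analysis_CV | ml_architecture/utils/helpers.py | find_section_boundaries
-- ===== SOURCE A (Python) =====
-- from typing import List, Dict, Any, Tuple
--
-- def find_section_boundaries(text: str, section_keywords: List[str]) -> Tuple[int, int]:
--     """
--     Tìm vị trí bắt đầu và kết thúc của một section
--     """
--     lines = text.split('\n')
--     start_idx = -1
--     end_idx = -1
--
--     for i, line in enumerate(lines):
--         line = line.lower()
--         if any(keyword.lower() in line for keyword in section_keywords):
--             if start_idx == -1:
--                 start_idx = i
--             else:
--                 end_idx = i
--                 break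
--
--     if start_idx != -1 and end_idx == -1:
--         end_idx = len(lines)
--
--     return start_idx, end_idx
-- ===== SOURCE B (Python) =====
-- from typing import List, Tuple
--
-- def find_section_boundaries(text: str, section_keywords: List[str]) -> Tuple[int, int]:
--     lines = [l.lower() for l in text.split('\n')]
--     hit = set()
--     for kw in section_keywords:
--         k = kw.lower()
--         hit.update(i for i, l in enumerate(lines) if k in l)
--     order = sorted(hit)
--     if not order:
--         return (-1, -1)
--     if len(order) == 1:
--         return (order[0], len(lines))
--     return (order[0], order[1])
-- ===== Notes on version B (the rewrite author's own statement) =====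
-- stated objective: alternative
-- what changed: Inverts the loop nesting: instead of A's line-major stateful scan with early break, B iterates keyword-major, unioning each keyword's matching line indices into a set, then sorts the set and selects the first/second index positionally.
import Mathlib
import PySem

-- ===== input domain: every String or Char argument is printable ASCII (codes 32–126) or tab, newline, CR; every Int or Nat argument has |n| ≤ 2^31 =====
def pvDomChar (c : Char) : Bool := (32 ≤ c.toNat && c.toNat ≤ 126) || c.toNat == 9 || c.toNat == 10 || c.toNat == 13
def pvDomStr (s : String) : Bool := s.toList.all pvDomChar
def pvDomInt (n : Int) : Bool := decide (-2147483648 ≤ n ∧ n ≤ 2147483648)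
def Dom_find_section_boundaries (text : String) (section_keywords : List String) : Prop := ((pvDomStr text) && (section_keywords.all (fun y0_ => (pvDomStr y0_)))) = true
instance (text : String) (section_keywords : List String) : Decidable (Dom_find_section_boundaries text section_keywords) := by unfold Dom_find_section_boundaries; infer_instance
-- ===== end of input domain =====

-- B inverts the loop nesting: keyword-major union of matching line indices into a set,
-- then sort and select positionally (objective: alternative algorithm; same asymptotic cost).

-- ===== PORT A =====
-- a line matches iff some keyword, lowercased, occurs in the lowercased line
def pvMatches (section_keywords : List String) (line : List Char) : Bool :=
  section_keywords.any (fun k => PySem.Chars.isIn (PySem.Chars.lower k.toList) (PySem.Chars.lower line))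

-- A's for-loop with state start_idx; `break` = returning (start, i) immediately
def pvLoopA (section_keywords : List String) : List (Int × List Char) → Int → Int × Int
  | [], start_idx => (start_idx, -1)
  | (i, line) :: rest, start_idx =>
    if pvMatches section_keywords line then
      if start_idx == -1 then pvLoopA section_keywords rest i
      else (start_idx, i)
    else pvLoopA section_keywords rest start_idx

def find_section_boundaries (text : String) (section_keywords : List String) : Int × Int :=
  let lines := PySem.Chars.splitOn text.toList ['\n']
  let r := pvLoopA section_keywords (PySem.List.enumerate lines) (-1)
  if r.1 ≠ -1 ∧ r.2 = -1 then (r.1, (lines.length : Int)) else r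

-- ===== PORT B =====
-- hit = set(); for kw in section_keywords: hit.update(i for i, l in enumerate(lines) if kw.lower() in l)
def pvHit (section_keywords : List String) (llines : List (List Char)) : PySem.Set Int :=
  section_keywords.foldl (fun s kw =>
    PySem.Set.update s (((PySem.List.enumerate llines).filter
      (fun p => PySem.Chars.isIn (PySem.Chars.lower kw.toList) p.2)).map (·.1)))
    PySem.Set.empty

def find_section_boundaries_alt (text : String) (section_keywords : List String) : Int × Int :=
  let lines := PySem.Chars.splitOn text.toList ['\n']
  let llines := lines.map PySem.Chars.lower
  let order := PySem.List.sorted (pvHit section_keywords llines) (fun x => x) false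
  match order with
  | [] => (-1, -1)
  | [m] => (m, (lines.length : Int))
  | m1 :: m2 :: _ => (m1, m2)

-- ===== PRECONDITION & SPEC =====
def Spec_find_section_boundaries (text : String) (section_keywords : List String) (out : Int × Int) : Prop := out = find_section_boundaries_alt text section_keywords
instance (text : String) (section_keywords : List String) (out : Int × Int) : Decidable (Spec_find_section_boundaries text section_keywords out) := by unfold Spec_find_section_boundaries; infer_instance

-- ===== CLAIM (what is proved, stated in full; the proofs are below) =====
def Claim_equal_find_section_boundaries : Prop := ∀ (text : String) (section_keywords : List String), Dom_find_section_boundaries text section_keywords → Spec_find_section_boundaries text section_keywords (find_section_boundaries text section_keywords)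

-- ===== LEMMAS AND PROOFS =====

-- the list of matching line indices, in order (A's loop is characterised by it)
def pvMs (kws : List String) (lines : List (List Char)) : List Int :=
  ((PySem.List.enumerate lines).filter (fun p => pvMatches kws p.2)).map (·.1)

-- phase 2 of A's loop (start already found, ≠ -1): returns (start, first match index or -1)
theorem pvLoopA_found (kws : List String) (ps : List (Int × List Char)) (s : Int) (hs : s ≠ -1) :
    pvLoopA kws ps s =
      (s, (((ps.filter (fun p => pvMatches kws p.2)).map (·.1)).headD (-1))) := by
  induction ps with
  | nil => simp [pvLoopA]
  | cons p rest ih =>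
    obtain ⟨i, line⟩ := p
    by_cases h : pvMatches kws line
    · simp [pvLoopA, h, hs]
    · simpa [pvLoopA, h] using ih

-- phase 1 (start = -1), assuming all indices are ≠ -1 (true for enumerate)
theorem pvLoopA_start (kws : List String) (ps : List (Int × List Char))
    (h : ∀ p ∈ ps, p.1 ≠ -1) :
    pvLoopA kws ps (-1) =
      match (ps.filter (fun p => pvMatches kws p.2)).map (·.1) with
      | [] => (-1, -1)
      | [m] => (m, -1)
      | m1 :: m2 :: _ => (m1, m2) := by
  induction ps with
  | nil => simp [pvLoopA]
  | cons p rest ih =>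
    obtain ⟨i, line⟩ := p
    have hi : i ≠ -1 := h (i, line) (by simp)
    by_cases hm : pvMatches kws line
    · have := pvLoopA_found kws rest i hi
      simp only [pvLoopA, hm, beq_self_eq_true, if_true, this,
        List.filter_cons, List.map_cons]
      cases hrest : (rest.filter (fun p => pvMatches kws p.2)).map (·.1) with
      | nil => simp
      | cons a l => simp
    · have := ih (fun q hq => h q (List.mem_cons_of_mem _ hq))
      simp [pvLoopA, hm, this]

theorem enumerate_fst_ne (lines : List (List Char)) :
    ∀ p ∈ PySem.List.enumerate lines, p.1 ≠ (-1 : Int) := by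
  intro p hp
  rw [PySem.List.mem_enumerate_iff] at hp
  obtain ⟨k, hk, rfl⟩ := hp
  simp

-- A equals the positional selection from pvMs
theorem pvMain (kws : List String) (lines : List (List Char)) :
    (if (pvLoopA kws (PySem.List.enumerate lines) (-1)).1 ≠ -1 ∧
        (pvLoopA kws (PySem.List.enumerate lines) (-1)).2 = -1
     then ((pvLoopA kws (PySem.List.enumerate lines) (-1)).1, (lines.length : Int))
     else pvLoopA kws (PySem.List.enumerate lines) (-1)) =
    (match pvMs kws lines with
     | [] => ((-1 : Int), (-1 : Int))
     | [m] => (m, (lines.length : Int))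
     | m1 :: m2 :: _ => (m1, m2)) := by
  have hall := enumerate_fst_ne lines
  rw [pvLoopA_start kws _ hall]
  have hms : (((PySem.List.enumerate lines).filter (fun p => pvMatches kws p.2)).map (·.1)) = pvMs kws lines := rfl
  rw [hms]
  have hmem : ∀ m ∈ pvMs kws lines, m ≠ (-1 : Int) := by
    intro m hm
    simp only [pvMs, List.mem_map, List.mem_filter] at hm
    obtain ⟨p, ⟨hp, _⟩, rfl⟩ := hm
    exact hall p hp
  cases hcase : pvMs kws lines with
  | nil => simp
  | cons m1 tl =>
    have h1 : m1 ≠ -1 := hmem m1 (by rw [hcase]; simp)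
    cases htl : tl with
    | nil => simp [h1]
    | cons m2 tl2 =>
      have h2 : m2 ≠ -1 := hmem m2 (by rw [hcase, htl]; simp)
      simp [h1, h2]

-- membership in a keyword-major foldl of set-updates
theorem pv_foldl_update_mem {α β : Type} [BEq α] [LawfulBEq α] (f : β → List α) (l : List β)
    (s : PySem.Set α) (y : α) :
    y ∈ l.foldl (fun s b => PySem.Set.update s (f b)) s ↔ y ∈ s ∨ ∃ b ∈ l, y ∈ f b := by
  induction l generalizing s with
  | nil => simp
  | cons b l ih =>
    simp only [List.foldl_cons, ih, PySem.Set.mem_update, List.mem_cons]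
    constructor
    · rintro (( h | h) | ⟨c, hc, hy⟩)
      · exact Or.inl h
      · exact Or.inr ⟨b, Or.inl rfl, h⟩
      · exact Or.inr ⟨c, Or.inr hc, hy⟩
    · rintro (h | ⟨c, (rfl | hc), hy⟩)
      · exact Or.inl (Or.inl h)
      · exact Or.inl (Or.inr hy)
      · exact Or.inr ⟨c, hc, hy⟩

theorem pv_foldl_update_nodup {α β : Type} [BEq α] [LawfulBEq α] (f : β → List α) (l : List β)
    (s : PySem.Set α) (hs : s.Nodup) :
    (l.foldl (fun s b => PySem.Set.update s (f b)) s).Nodup := by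
  induction l generalizing s with
  | nil => exact hs
  | cons b l ih => exact ih _ (PySem.Set.nodup_update s (f b) hs)

-- membership in B's set = membership in pvMs
theorem mem_pvHit (kws : List String) (lines : List (List Char)) (y : Int) :
    y ∈ pvHit kws (lines.map PySem.Chars.lower) ↔ y ∈ pvMs kws lines := by
  unfold pvHit pvMs
  rw [pv_foldl_update_mem]
  simp only [PySem.Set.empty, List.not_mem_nil, false_or, List.mem_map, List.mem_filter,
    PySem.List.mem_enumerate_iff, pvMatches, List.any_eq_true]
  constructor
  · rintro ⟨kw, hkw, p, ⟨⟨k, hk, rfl⟩, hin⟩, rfl⟩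
    simp only [List.length_map] at hk
    refine ⟨(0 + (k : Int), lines[k]), ⟨⟨k, hk, rfl⟩, ⟨kw, hkw, ?_⟩⟩, rfl⟩
    simpa [List.getElem_map] using hin
  · rintro ⟨p, ⟨⟨k, hk, rfl⟩, kw, hkw, hin⟩, rfl⟩
    refine ⟨kw, hkw, ((0 : Int) + (k : Int), (lines.map PySem.Chars.lower)[k]'(by simpa using hk)),
      ⟨⟨k, by simpa using hk, rfl⟩, ?_⟩, rfl⟩
    simpa [List.getElem_map] using hin

theorem pairwise_pvMs (kws : List String) (lines : List (List Char)) :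
    (pvMs kws lines).Pairwise (· < ·) := by
  unfold pvMs
  exact List.pairwise_map.mpr ((PySem.List.pairwise_lt_enumerate lines 0).filter _)

theorem sorted_hit_eq (kws : List String) (lines : List (List Char)) :
    PySem.List.sorted (pvHit kws (lines.map PySem.Chars.lower)) (fun x => x) false
      = pvMs kws lines := by
  have hnd_ms : (pvMs kws lines).Nodup :=
    (pairwise_pvMs kws lines).imp (fun h => ne_of_lt h)
  have hnd_hit : (pvHit kws (lines.map PySem.Chars.lower)).Nodup :=
    pv_foldl_update_nodup _ _ _ (by simp [PySem.Set.empty])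
  have hperm : (pvMs kws lines).Perm (pvHit kws (lines.map PySem.Chars.lower)) :=
    (List.perm_ext_iff_of_nodup hnd_ms hnd_hit).mpr (fun y => (mem_pvHit kws lines y).symm)
  exact PySem.List.sorted_eq_of_perm_of_pairwise_lt _ _ _ hperm (pairwise_pvMs kws lines)

-- ===== VERDICT (by name: the statement is the Claim_ definition above) =====
theorem find_section_boundaries_spec : Claim_equal_find_section_boundaries := by
  intro text kws _
  show _ = _
  simp only [find_section_boundaries, find_section_boundaries_alt]
  rw [sorted_hit_eq]
  exact pvMain kws _
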